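-- pv_equiv track=rewrite | github.com/pablo33/quodlibet-filesorter | quodlibet_filesorter.py | Getchunklist
-- ===== SOURCE A (Python) =====
-- def Getchunklist (fgstring, delimitters):
-- 	'''Getchunklist
--
-- 	It splits into chunks a string expression due to delimiters
-- 	delimieters must be a string of two characters
-- 	it returns a list of aplitted texts
--
-- 	example:
-- 	Getchunklist ('~/Genre/<artist>/<album>/[<cd> -][<track> -]<title>.<ext>', '[]')
-- 	Generated list is:
-- 	[
-- 		'~/Genre/<artist>/<album>/',
-- 		'[<cd> -]',
-- 		'[<track> -]',
-- 		'<title>.<ext>'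
-- 		]
-- 	'''
-- 	chunklist = []
-- 	if fgstring == '' or fgstring == None:
-- 		return []
-- 	from_pos, to_pos, switch = 0,0,0
-- 	for char in fgstring:
-- 		if char == delimitters[0] and switch == 0:
-- 			if from_pos != to_pos:
-- 				chunklist.append (fgstring[from_pos:to_pos])
-- 			switch = 1
-- 			from_pos = to_pos
-- 		elif char == delimitters[1] and switch == 1:
-- 			chunklist.append (fgstring[from_pos:to_pos + 1])
-- 			switch = 0
-- 			from_pos = to_pos + 1
-- 		to_pos += 1
-- 	if from_pos < to_pos:
-- 		chunklist.append (fgstring[from_pos:to_pos])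
-- 	return chunklist
-- ===== SOURCE B (Python) =====
-- def Getchunklist(fgstring, delimitters):
--     if fgstring == '' or fgstring is None:
--         return []
--     op, cl = delimitters[0], delimitters[1]
--     chunks = []
--     i, n = 0, len(fgstring)
--     while i < n:
--         j = fgstring.find(op, i)
--         if j == -1:
--             chunks.append(fgstring[i:])
--             break
--         if j > i:
--             chunks.append(fgstring[i:j])
--         k = fgstring.find(cl, j + 1)
--         if k == -1:
--             chunks.append(fgstring[j:])
--             break
--         chunks.append(fgstring[j:k + 1])
--         i = k + 1
--     return chunks
-- ===== Notes on version B (the rewrite author's own statement) =====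
-- stated objective: alternative
-- what changed: Replaces A's per-character switch state machine with a jump scan that uses str.find to locate the next open and close delimiters and slices whole chunks between them.
-- outside the precondition, e.g. on Getchunklist('[', '['): A returns ['['], B raises IndexError; on Getchunklist('ab', '['): A raises IndexError, B raises IndexError
import Mathlib
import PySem

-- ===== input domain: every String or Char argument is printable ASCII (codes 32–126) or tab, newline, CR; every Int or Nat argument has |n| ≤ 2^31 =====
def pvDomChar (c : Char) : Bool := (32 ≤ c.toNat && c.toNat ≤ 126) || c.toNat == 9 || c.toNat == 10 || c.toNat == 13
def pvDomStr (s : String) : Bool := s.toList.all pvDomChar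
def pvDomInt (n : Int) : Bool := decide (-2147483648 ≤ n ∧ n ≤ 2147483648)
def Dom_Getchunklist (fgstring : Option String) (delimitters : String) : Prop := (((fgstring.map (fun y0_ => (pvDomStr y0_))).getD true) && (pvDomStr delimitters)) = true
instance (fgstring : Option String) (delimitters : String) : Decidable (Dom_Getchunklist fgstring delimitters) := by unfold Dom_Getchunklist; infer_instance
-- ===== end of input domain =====

-- B replaces A's per-character switch state machine by jump-scanning with str.find for the
-- next open/close delimiter (alternative decomposition; same asymptotic cost).

-- ===== PORT A =====
-- Python s[a:b] for the 0 ≤ a ≤ b indices A uses: exact as drop/take (PySem.List.slice_natCast).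
def pvSlice (cs : List Char) (a b : Nat) : String := String.ofList ((cs.drop a).take (b - a))

-- A's for-loop: state (chunklist, from_pos, to_pos, switch), one step per character.
def pvLoopA (cs : List Char) (d0 d1 : Char) : List Char → List String → Nat → Nat → Nat → List String
  | [], acc, fp, tp, _ => if fp < tp then acc ++ [pvSlice cs fp tp] else acc
  | c :: rest, acc, fp, tp, sw =>
    if c = d0 ∧ sw = 0 then
      pvLoopA cs d0 d1 rest (if fp ≠ tp then acc ++ [pvSlice cs fp tp] else acc) tp (tp + 1) 1
    else if c = d1 ∧ sw = 1 then
      pvLoopA cs d0 d1 rest (acc ++ [pvSlice cs fp (tp + 1)]) (tp + 1) (tp + 1) 0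
    else
      pvLoopA cs d0 d1 rest acc fp (tp + 1) sw

-- delimitters[0]/delimitters[1]: Python raises IndexError when missing; Pre_ guarantees two
-- characters whenever the loop runs, so the getD defaults are never reached inside Pre_.
def Getchunklist (fgstring : Option String) (delimitters : String) : List String :=
  match fgstring with
  | none => []
  | some s =>
    if s = "" then []
    else
      let cs := s.toList
      let d := delimitters.toList
      pvLoopA cs (d.getD 0 ' ') (d.getD 1 ' ') cs [] 0 0 0

-- ===== PORT B =====
-- Source B's while loop, fuel = len(fgstring) (i advances by ≥ 2 per iteration, so fuel never runs out);
-- str.find(c, i) is PySem.Chars.findFrom; fgstring[i:] is List.drop.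
def pvLoopB (cs : List Char) (d0 d1 : Char) (n : Nat) : Nat → Nat → List String → List String
  | 0, _, acc => acc
  | fuel + 1, i, acc =>
    if i < n then
      let j := PySem.Chars.findFrom cs [d0] (i : Int) none
      if j = -1 then acc ++ [String.ofList (cs.drop i)]
      else
        let jn := j.toNat
        let acc1 := if i < jn then acc ++ [pvSlice cs i jn] else acc
        let k := PySem.Chars.findFrom cs [d1] (((jn + 1 : Nat)) : Int) none
        if k = -1 then acc1 ++ [String.ofList (cs.drop jn)]
        else pvLoopB cs d0 d1 n fuel (k.toNat + 1) (acc1 ++ [pvSlice cs jn (k.toNat + 1)])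
    else acc

def Getchunklist_alt (fgstring : Option String) (delimitters : String) : List String :=
  match fgstring with
  | none => []
  | some s =>
    if s = "" then []
    else
      let cs := s.toList
      let d := delimitters.toList
      pvLoopB cs (d.getD 0 ' ') (d.getD 1 ' ') cs.length cs.length 0 []

-- ===== PRECONDITION & SPEC =====
-- Pre_ excludes a sub-two-character delimitters with a nonempty fgstring: there Python A raises
-- IndexError on almost every input (it returns only on a degenerate one-character match) and B
-- raises eagerly; the docstring demands a two-character delimiter string.
def Pre_Getchunklist (fgstring : Option String) (delimitters : String) : Prop :=
  fgstring = none ∨ fgstring = some "" ∨ 2 ≤ delimitters.toList.length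

instance (fgstring : Option String) (delimitters : String) : Decidable (Pre_Getchunklist fgstring delimitters) := by
  unfold Pre_Getchunklist; infer_instance

def pvWitness_Getchunklist : Option String × String := (some "~/g/<a>/[<c> -]<t>", "[]")

def Spec_Getchunklist (fgstring : Option String) (delimitters : String) (out : List String) : Prop := out = Getchunklist_alt fgstring delimitters
instance (fgstring : Option String) (delimitters : String) (out : List String) : Decidable (Spec_Getchunklist fgstring delimitters out) := by unfold Spec_Getchunklist; infer_instance

-- ===== CLAIM (what is proved, stated in full; the proofs are below) =====
def Claim_equal_Getchunklist : Prop := ∀ (fgstring : Option String) (delimitters : String), Dom_Getchunklist fgstring delimitters → Pre_Getchunklist fgstring delimitters → Spec_Getchunklist fgstring delimitters (Getchunklist fgstring delimitters)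

-- ===== LEMMAS AND PROOFS =====

-- str.find(c, i) = -1 means: no occurrence of c at or after position i.
lemma pvFind_none (cs : List Char) (c : Char) (i : Nat) (hi : i ≤ cs.length)
    (h : PySem.Chars.findFrom cs [c] (i : Int) none = -1) :
    ∀ m, i ≤ m → (hm : m < cs.length) → cs[m] ≠ c := by
  intro m him hm hc
  rw [PySem.Chars.findFrom_natCast_eq_neg_one_iff cs [c] i hi] at h
  apply h
  have hpref : [c] <+: cs.drop m := by
    refine ⟨cs.drop (m + 1), ?_⟩
    rw [List.drop_eq_getElem_cons hm, hc]; rfl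
  have hsuf : cs.drop m <:+ cs.drop i := by
    have e : cs.drop m = (cs.drop i).drop (m - i) := by
      rw [List.drop_drop]; congr 1; omega
    rw [e]; exact List.drop_suffix _ _
  exact hpref.isInfix.trans hsuf.isInfix

-- str.find(c, i) ≠ -1 gives the first occurrence of c at or after i.
lemma pvFind_some (cs : List Char) (c : Char) (i : Nat) (hi : i ≤ cs.length)
    (h : PySem.Chars.findFrom cs [c] (i : Int) none ≠ -1) :
    let jn := (PySem.Chars.findFrom cs [c] (i : Int) none).toNat
    i ≤ jn ∧ ∃ (hj : jn < cs.length), cs[jn] = c ∧ ∀ m, i ≤ m → m < jn → (hm : m < cs.length) → cs[m] ≠ c := by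
  intro jn
  obtain ⟨h1, h2, h3⟩ := PySem.Chars.findFrom_natCast_spec cs [c] i hi h
  have hij : i ≤ jn := by omega
  obtain ⟨t, ht⟩ := h2
  have hjlt : jn < cs.length := by
    by_contra hge
    rw [List.drop_eq_nil_of_le (by omega)] at ht
    simp at ht
  refine ⟨hij, hjlt, ?_, ?_⟩
  · rw [List.drop_eq_getElem_cons hjlt] at ht
    injection ht with h1 _
    exact h1.symm
  · intro m him hmj hm hc
    apply h3 m him hmj
    refine ⟨cs.drop (m + 1), ?_⟩
    rw [List.drop_eq_getElem_cons hm, hc]; rfl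

-- A's loop in switch = 0 skips every character that is not the open delimiter.
lemma pvSkip0 (cs : List Char) (d0 d1 : Char) (acc : List String) (fp : Nat) :
    ∀ k a, a + k ≤ cs.length →
    (∀ m, a ≤ m → m < a + k → (hm : m < cs.length) → cs[m] ≠ d0) →
    pvLoopA cs d0 d1 (cs.drop a) acc fp a 0 = pvLoopA cs d0 d1 (cs.drop (a + k)) acc fp (a + k) 0 := by
  intro k
  induction k with
  | zero => intro a _ _; rfl
  | succ k ih =>
    intro a hlen hne
    have ha : a < cs.length := by omega
    rw [List.drop_eq_getElem_cons ha]
    simp only [pvLoopA]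
    rw [if_neg (by simp [hne a le_rfl (by omega) ha]), if_neg (by simp)]
    rw [show a + (k + 1) = (a + 1) + k from by omega]
    exact ih (a + 1) (by omega) (fun m h1 h2 hm => hne m (by omega) (by omega) hm)

-- A's loop in switch = 1 skips every character that is not the close delimiter.
lemma pvSkip1 (cs : List Char) (d0 d1 : Char) (acc : List String) (fp : Nat) :
    ∀ k a, a + k ≤ cs.length →
    (∀ m, a ≤ m → m < a + k → (hm : m < cs.length) → cs[m] ≠ d1) →
    pvLoopA cs d0 d1 (cs.drop a) acc fp a 1 = pvLoopA cs d0 d1 (cs.drop (a + k)) acc fp (a + k) 1 := by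
  intro k
  induction k with
  | zero => intro a _ _; rfl
  | succ k ih =>
    intro a hlen hne
    have ha : a < cs.length := by omega
    rw [List.drop_eq_getElem_cons ha]
    simp only [pvLoopA]
    rw [if_neg (by simp), if_neg (by simp [hne a le_rfl (by omega) ha])]
    rw [show a + (k + 1) = (a + 1) + k from by omega]
    exact ih (a + 1) (by omega) (fun m h1 h2 hm => hne m (by omega) (by omega) hm)

-- The central correspondence: A's state machine restarted at index i (switch = 0, empty pending
-- chunk) computes exactly one round of B's jump scan and recurses.
lemma pvMain (cs : List Char) (d0 d1 : Char) :
    ∀ fuel i acc, i ≤ cs.length → cs.length - i ≤ fuel →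
    pvLoopA cs d0 d1 (cs.drop i) acc i i 0 = pvLoopB cs d0 d1 cs.length fuel i acc := by
  intro fuel
  induction fuel with
  | zero =>
    intro i acc hi hf
    have : i = cs.length := by omega
    subst this
    simp [pvLoopA, pvLoopB, List.drop_length]
  | succ fuel ih =>
    intro i acc hi hf
    by_cases hin : i < cs.length
    · simp only [pvLoopB, if_pos hin]
      by_cases hJ : PySem.Chars.findFrom cs [d0] (i : Int) none = -1
      · rw [if_pos hJ]
        rw [pvSkip0 cs d0 d1 acc i (cs.length - i) i (by omega)
              (fun m h1 h2 hm => pvFind_none cs d0 i hi hJ m h1 hm)]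
        have hdrop : i + (cs.length - i) = cs.length := by omega
        rw [hdrop, List.drop_length]
        simp only [pvLoopA, if_pos hin]
        congr 1
        simp [pvSlice, List.take_of_length_le, List.length_drop]
      · rw [if_neg hJ]
        obtain ⟨hij, hjlt, hjc, hjmin⟩ := pvFind_some cs d0 i hi hJ
        set jn := (PySem.Chars.findFrom cs [d0] (i : Int) none).toNat with hjn
        rw [pvSkip0 cs d0 d1 acc i (jn - i) i (by omega)
              (fun m h1 h2 hm => hjmin m h1 (by omega) hm)]
        have hji : i + (jn - i) = jn := by omega
        rw [hji, List.drop_eq_getElem_cons hjlt]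
        simp only [pvLoopA]
        rw [if_pos (by exact ⟨hjc, trivial⟩)]
        have haccs : (if i ≠ jn then acc ++ [pvSlice cs i jn] else acc)
            = (if i < jn then acc ++ [pvSlice cs i jn] else acc) := by
          congr 1; simp; omega
        rw [haccs]
        set acc1 := if i < jn then acc ++ [pvSlice cs i jn] else acc with hacc1
        by_cases hK : PySem.Chars.findFrom cs [d1] (((jn + 1 : Nat)) : Int) none = -1
        · rw [if_pos hK]
          rw [pvSkip1 cs d0 d1 acc1 jn (cs.length - (jn + 1)) (jn + 1) (by omega)
                (fun m h1 h2 hm => pvFind_none cs d1 (jn + 1) (by omega) hK m h1 hm)]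
          have : jn + 1 + (cs.length - (jn + 1)) = cs.length := by omega
          rw [this, List.drop_length]
          simp only [pvLoopA, if_pos (show jn < cs.length from hjlt)]
          congr 1
          simp [pvSlice, List.take_of_length_le, List.length_drop]
        · rw [if_neg hK]
          obtain ⟨hjk, hklt, hkc, hkmin⟩ := pvFind_some cs d1 (jn + 1) (by omega) hK
          set kn := (PySem.Chars.findFrom cs [d1] (((jn + 1 : Nat)) : Int) none).toNat with hkn
          rw [pvSkip1 cs d0 d1 acc1 jn (kn - (jn + 1)) (jn + 1) (by omega)
                (fun m h1 h2 hm => hkmin m h1 (by omega) hm)]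
          have hki : jn + 1 + (kn - (jn + 1)) = kn := by omega
          rw [hki, List.drop_eq_getElem_cons hklt]
          simp only [pvLoopA]
          rw [if_neg (by simp), if_pos (by exact ⟨hkc, trivial⟩)]
          exact ih (kn + 1) (acc1 ++ [pvSlice cs jn (kn + 1)]) (by omega) (by omega)
    · have : i = cs.length := by omega
      subst this
      simp [pvLoopA, pvLoopB, List.drop_length]

-- ===== VERDICT (by name: the statement is the Claim_ definition above) =====
theorem Getchunklist_spec : Claim_equal_Getchunklist := by
  intro fgstring delimitters _ _
  unfold Spec_Getchunklist Getchunklist Getchunklist_alt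
  match fgstring with
  | none => rfl
  | some s =>
    by_cases hs : s = ""
    · simp [hs]
    · simp only [if_neg hs]
      have := pvMain s.toList (delimitters.toList.getD 0 ' ') (delimitters.toList.getD 1 ' ')
        s.toList.length 0 [] (by omega) (by omega)
      simpa using this
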